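-- pv_equiv track=rewrite | github.com/stubbi/ditto | eval/ditto_eval/benchmarks/locomo.py | _stratify
-- ===== SOURCE A (Python) =====
-- def _stratify(qa: list, max_per_cat: int | None) -> list:
--     if max_per_cat is None:
--         return qa
--     buckets: dict[int, list] = {}
--     for q in qa:
--         buckets.setdefault(q["category"], []).append(q)
--     out: list = []
--     for cat, items in buckets.items():
--         out.extend(items[:max_per_cat])
--     return out
-- ===== SOURCE B (Python) =====
-- def _stratify(qa: list, max_per_cat: int | None) -> list:
--     if max_per_cat is None:
--         return qa
--     def go(rest: list) -> list:
--         if not rest: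
--             return []
--         c = rest[0]["category"]
--         same = [q for q in rest if q["category"] == c]
--         other = [q for q in rest if q["category"] != c]
--         return same[:max_per_cat] + go(other)
--     return go(qa)
-- ===== Notes on version B (the rewrite author's own statement) =====
-- stated objective: alternative
-- what changed: Replaced the bucket-dict grouping with a recursive partition: repeatedly take the first remaining item's category, emit that category's items sliced to max_per_cat, and recurse on the items of other categories.
import Mathlib
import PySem

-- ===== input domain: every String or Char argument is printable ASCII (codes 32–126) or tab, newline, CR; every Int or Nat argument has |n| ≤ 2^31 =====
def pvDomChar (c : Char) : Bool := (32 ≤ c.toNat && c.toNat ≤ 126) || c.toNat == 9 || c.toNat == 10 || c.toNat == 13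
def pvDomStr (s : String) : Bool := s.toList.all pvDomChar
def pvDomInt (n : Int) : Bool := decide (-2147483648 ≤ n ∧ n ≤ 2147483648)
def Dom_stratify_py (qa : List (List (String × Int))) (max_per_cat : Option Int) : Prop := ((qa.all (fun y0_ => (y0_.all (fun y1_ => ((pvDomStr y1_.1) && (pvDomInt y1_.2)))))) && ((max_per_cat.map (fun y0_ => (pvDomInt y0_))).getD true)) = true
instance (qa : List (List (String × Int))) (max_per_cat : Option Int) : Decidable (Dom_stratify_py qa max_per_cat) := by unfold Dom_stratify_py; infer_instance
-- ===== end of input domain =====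

-- B replaces A's bucket-dict grouping by a recursive partition on the first remaining item's
-- category: emit that category's items sliced to max_per_cat, recurse on the rest (alternative
-- decomposition, same return value).


-- ===== PORT A =====
-- q["category"]: first-match lookup in the association list (Pre_ guarantees the key exists)
def pvCatA (q : List (String × Int)) : Option Int :=
  (q.find? (fun p => p.1 == "category")).map (·.2)

def stratify_py (qa : List (List (String × Int))) (max_per_cat : Option Int) : List (List (String × Int)) :=
  match max_per_cat with
  | none => qa
  | some m =>
    let buckets : PySem.Dict (Option Int) (List (List (String × Int))) :=
      qa.foldl (fun d q => d.modify (pvCatA q) [] (fun v => v ++ [q])) PySem.Dict.empty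
    buckets.items.foldl (fun out p => out ++ PySem.List.slice p.2 none (some m)) []

-- ===== PORT B =====
def pvCatB (q : List (String × Int)) : Option Int :=
  (q.find? (fun p => p.1 == "category")).map (·.2)

-- recursive partition: peel off the first item's category, slice, recurse on the other categories
def pvGo (m : Int) : List (List (String × Int)) → List (List (String × Int))
  | [] => []
  | x :: t =>
    PySem.List.slice ((x :: t).filter (fun q => pvCatB q == pvCatB x)) none (some m)
      ++ pvGo m ((x :: t).filter (fun q => !(pvCatB q == pvCatB x)))
termination_by rest => rest.length
decreasing_by
  simp only [List.filter_cons, beq_self_eq_true, Bool.not_true, List.length_cons]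
  exact Nat.lt_succ_of_le (List.length_filter_le _ t)

def stratify_py_alt (qa : List (List (String × Int))) (max_per_cat : Option Int) : List (List (String × Int)) :=
  match max_per_cat with
  | none => qa
  | some m => pvGo m qa

-- ===== PRECONDITION & SPEC =====
-- Pre_ excludes only the inputs where Python raises KeyError: max_per_cat given and some item lacks the "category" key.
def Pre_stratify_py (qa : List (List (String × Int))) (max_per_cat : Option Int) : Prop :=
  max_per_cat = none ∨ ∀ q ∈ qa, (q.map Prod.fst).contains "category" = true
instance (qa : List (List (String × Int))) (max_per_cat : Option Int) : Decidable (Pre_stratify_py qa max_per_cat) := by unfold Pre_stratify_py; infer_instance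

def pvWitness_stratify_py : (List (List (String × Int))) × Option Int :=
  ([[("category", 1), ("id", 0)], [("category", 2)], [("category", 1)]], some 1)

def Spec_stratify_py (qa : List (List (String × Int))) (max_per_cat : Option Int) (out : List (List (String × Int))) : Prop := out = stratify_py_alt qa max_per_cat
instance (qa : List (List (String × Int))) (max_per_cat : Option Int) (out : List (List (String × Int))) : Decidable (Spec_stratify_py qa max_per_cat out) := by unfold Spec_stratify_py; infer_instance

-- ===== CLAIM (what is proved, stated in full; the proofs are below) =====
def Claim_equal_stratify_py : Prop := ∀ (qa : List (List (String × Int))) (max_per_cat : Option Int), Dom_stratify_py qa max_per_cat → Pre_stratify_py qa max_per_cat → Spec_stratify_py qa max_per_cat (stratify_py qa max_per_cat)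

-- ===== LEMMAS AND PROOFS =====

theorem pv_flatMap_congr_mem {α β : Type} {l : List α} {f g : α → List β}
    (h : ∀ x ∈ l, f x = g x) : l.flatMap f = l.flatMap g := by
  induction l with
  | nil => rfl
  | cons x t ih =>
    simp only [List.flatMap_cons, h x (List.mem_cons_self), ih (fun y hy => h y (List.mem_cons_of_mem x hy))]

-- adding elements equal to one already present changes nothing: the set-fold skips them
theorem pv_foldl_add_filter (c : Option Int) :
    ∀ (ys s : List (Option Int)), c ∈ s →
      ys.foldl PySem.Set.add s = (ys.filter (fun y => !(y == c))).foldl PySem.Set.add s := by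
  intro ys
  induction ys with
  | nil => intro s _; rfl
  | cons y t ih =>
    intro s hc
    by_cases hy : y = c
    · subst hy
      have hadd : PySem.Set.add s y = s := by
        simp [PySem.Set.add, PySem.Set.contains, hc]
      simp only [List.filter_cons, beq_self_eq_true, Bool.not_true, List.foldl_cons, hadd]
      exact ih s hc
    · have : (y == c) = false := by simp [hy]
      simp only [List.filter_cons, this, Bool.not_false, List.foldl_cons]
      apply ih
      by_cases hmem : y ∈ s
      · simpa [PySem.Set.add, PySem.Set.contains, hmem] using hc
      · simp [PySem.Set.add, PySem.Set.contains, hmem, List.mem_append, hc]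

-- a head element not occurring in the rest floats out of the set-fold
theorem pv_foldl_add_cons (c : Option Int) :
    ∀ (l s : List (Option Int)), (∀ y ∈ l, (y == c) = false) →
      l.foldl PySem.Set.add (c :: s) = c :: l.foldl PySem.Set.add s := by
  intro l
  induction l with
  | nil => intro s _; rfl
  | cons y t ih =>
    intro s h
    have hy : (y == c) = false := h y (List.mem_cons_self)
    have hstep : PySem.Set.add (c :: s) y = c :: PySem.Set.add s y := by
      by_cases hmem : y ∈ s
      all_goals
        have hy' : ¬ y = c := by simpa using hy
        simp [PySem.Set.add, PySem.Set.contains, hmem, hy']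
    simp only [List.foldl_cons, hstep]
    exact ih _ (fun z hz => h z (List.mem_cons_of_mem y hz))

theorem pv_dedup_cons (c : Option Int) (ys : List (Option Int)) :
    PySem.List.dedup (c :: ys) = c :: PySem.List.dedup (ys.filter (fun y => !(y == c))) := by
  have h0 : ∀ (l : List (Option Int)), PySem.List.dedup l = l.foldl PySem.Set.add [] := by
    intro l; rfl
  rw [h0, h0]
  have h1 : (c :: ys).foldl PySem.Set.add [] = ys.foldl PySem.Set.add [c] := by
    simp [PySem.Set.add, PySem.Set.contains]
  rw [h1, pv_foldl_add_filter c ys [c] (List.mem_singleton.mpr rfl)]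
  exact pv_foldl_add_cons c _ [] (fun y hy => by
    have := List.of_mem_filter hy
    simpa using this)

-- A's dict-of-buckets output characterised as: distinct categories in first-appearance order,
-- each contributing its filtered items sliced to m
theorem pv_core (qa : List (List (String × Int))) (m : Int) :
    ((qa.foldl (fun d q => d.modify (pvCatA q) [] (fun v => v ++ [q])) PySem.Dict.empty).items).foldl
        (fun out p => out ++ PySem.List.slice p.2 none (some m)) []
    = (PySem.List.dedup (qa.map pvCatA)).flatMap
        (fun c => PySem.List.slice (qa.filter (fun q => pvCatA q == c)) none (some m)) := by
  set B := qa.foldl (fun d q => d.modify (pvCatA q) [] (fun v => v ++ [q])) PySem.Dict.empty with hB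
  have hB2 : B = (qa.map (fun q => (pvCatA q, q))).foldl
      (fun d p => d.modify p.1 [] (fun v => v ++ [p.2])) PySem.Dict.empty := by
    rw [List.foldl_map]
  have hget : ∀ c, B.getD c [] = qa.filter (fun q => pvCatA q == c) := by
    intro c
    rw [hB2, PySem.Dict.getD_foldl_modify_append]
    simp [List.filter_map, Function.comp_def]
  have hkeys : B.keys = PySem.List.dedup (qa.map pvCatA) := by
    have h := PySem.Dict.keys_foldl_modify_key qa pvCatA [] (fun _ q v => v ++ [q]) PySem.Dict.empty
    simp only [PySem.List.dedup_eq_ofList, PySem.Set.ofList, PySem.Set.update] at *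
    rw [hB, h]
    rfl
  have hnodup : B.keys.Nodup := by
    rw [hB]
    exact PySem.Dict.nodup_keys_foldl_modify_key qa pvCatA [] (fun _ q v => v ++ [q])
      PySem.Dict.empty (by simp [PySem.Dict.keys_empty])
  rw [PySem.List.foldl_append_eq_flatMap, List.nil_append]
  have step1 : B.items.flatMap (fun p => PySem.List.slice p.2 none (some m))
      = B.items.flatMap (fun p => PySem.List.slice (qa.filter (fun q => pvCatA q == p.1)) none (some m)) := by
    apply pv_flatMap_congr_mem
    intro p hp
    have h2 : B.getD p.1 [] = p.2 :=
      PySem.Dict.getD_of_mem_items B (by exact hp) hnodup []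
    rw [← h2, hget]
  rw [step1, ← hkeys]
  have hkdef : B.keys = B.items.map Prod.fst := rfl
  rw [hkdef, List.flatMap_map]

-- B's recursive partition computes the same first-appearance-grouped flatMap
theorem pv_go_eq (m : Int) : ∀ (l : List (List (String × Int))),
    pvGo m l = (PySem.List.dedup (l.map pvCatB)).flatMap
        (fun c => PySem.List.slice (l.filter (fun q => pvCatB q == c)) none (some m)) := by
  intro l
  induction l using pvGo.induct with
  | case1 => simp [pvGo]
  | case2 x t ih =>
    set c := pvCatB x with hc
    set r := (x :: t).filter (fun q => !(pvCatB q == c)) with hr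
    have hmap : (x :: t).map pvCatB = c :: t.map pvCatB := rfl
    have hrmap : (t.map pvCatB).filter (fun y => !(y == c)) = r.map pvCatB := by
      have hxfalse : (!(pvCatB x == c)) = false := by rw [hc]; simp
      rw [hr]
      simp only [List.filter_cons, hxfalse, Bool.false_eq_true, if_false]
      rw [List.filter_map]
      simp only [Function.comp_def]
    have hded : PySem.List.dedup ((x :: t).map pvCatB)
        = c :: PySem.List.dedup (r.map pvCatB) := by
      rw [hmap, pv_dedup_cons, hrmap]
    rw [pvGo, hded, List.flatMap_cons, ih]
    congr 1
    apply pv_flatMap_congr_mem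
    intro c' hc'
    have hne : c' ≠ c := by
      have hm : c' ∈ r.map pvCatB := (PySem.List.mem_dedup _ _).mp hc'
      obtain ⟨q, hq, hqc⟩ := List.mem_map.mp hm
      have := List.of_mem_filter hq
      intro h
      rw [hqc] at this
      simp [h] at this
    congr 1
    rw [hr, List.filter_filter]
    apply List.filter_congr
    intro q _
    by_cases hq : pvCatB q = c'
    · simp [hq, hne]
    · simp [hq]

-- ===== VERDICT (by name: the statement is the Claim_ definition above) =====
theorem stratify_py_spec : Claim_equal_stratify_py := by
  intro qa mpc _ _
  unfold Spec_stratify_py stratify_py stratify_py_alt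
  cases mpc with
  | none => rfl
  | some m =>
    show (List.foldl (fun out p => out ++ PySem.List.slice p.2 none (some m)) []
      (List.foldl (fun d q => d.modify (pvCatA q) [] fun v => v ++ [q]) PySem.Dict.empty qa).items)
      = pvGo m qa
    rw [pv_core, pv_go_eq]
    rfl
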